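-- pv_equiv track=rewrite | github.com/bredky/adcreative | app.py | extract_taxonomy_value
-- ===== SOURCE A (Python) =====
-- def extract_taxonomy_value(text, key):
--     try:
--         parts = str(text).split('_')
--         for part in parts:
--             if part.startswith(f"{key}~"):
--                 return part.split('~')[1].strip()
--         return None
--     except:
--         return None
-- ===== SOURCE B (Python) =====
-- def extract_taxonomy_value(text, key):
--     try:
--         taxonomy = {}
--         for part in str(text).split('_'):
--             if '~' in part:
--                 segs = part.split('~')
--                 taxonomy.setdefault(segs[0], segs[1].strip())
--         return taxonomy.get(key)
--     except:
--         return None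
-- ===== Notes on version B (the rewrite author's own statement) =====
-- stated objective: alternative
-- what changed: B replaces A's linear scan-with-early-return by one pass that builds a first-occurrence taxonomy dict (setdefault on the segment before the first '~') followed by a single dict lookup.
-- intended difference: When key itself contains '~' and some '_'-part of text starts with key+'~', A returns the segment between the part's first and second '~' (a fragment of the key itself, e.g. 'b' for key 'a~b'), while B returns None; None is intended because taxonomy keys cannot contain the '~' delimiter and A's value is an accident of indexing split('~')[1]. — e.g. on extract_taxonomy_value("a~b~c", "a~b"): A returns some "b", B returns none
import Mathlib
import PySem

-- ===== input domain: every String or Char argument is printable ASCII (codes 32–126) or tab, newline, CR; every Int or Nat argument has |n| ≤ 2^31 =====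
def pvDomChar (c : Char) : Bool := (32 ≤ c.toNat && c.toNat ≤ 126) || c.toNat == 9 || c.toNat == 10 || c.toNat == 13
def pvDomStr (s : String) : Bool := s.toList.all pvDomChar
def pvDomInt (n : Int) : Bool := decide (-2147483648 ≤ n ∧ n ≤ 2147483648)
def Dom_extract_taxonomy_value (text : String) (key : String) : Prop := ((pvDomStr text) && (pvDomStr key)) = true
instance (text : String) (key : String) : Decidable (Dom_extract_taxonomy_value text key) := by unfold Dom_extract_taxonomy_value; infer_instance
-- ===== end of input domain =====

-- B replaces A's linear scan-with-early-return by one pass building a first-occurrence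
-- taxonomy dict (setdefault keyed by the segment before the first '~') followed by one
-- dict lookup; same cost, different structure (objective: alternative).

-- ===== PORT A =====
-- A's 'for part in parts: if part.startswith(key+"~"): return part.split('~')[1].strip()'
def pvScanA (key : String) : List String → Option String
  | [] => none
  | part :: rest =>
    if PySem.Str.startswith part (key ++ "~") then
      -- part.split('~')[1].strip(); an IndexError here would be caught by the bare except → None
      match PySem.List.pyGet? ((PySem.Str.split? part "~").getD []) 1 with
      | some v => some (PySem.Str.strip v)
      | none => none
    else pvScanA key rest

def extract_taxonomy_value (text : String) (key : String) : Option String :=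
  -- str(text).split('_'); split? is always `some` since the separator "_" is nonempty
  pvScanA key ((PySem.Str.split? text "_").getD [])

-- ===== PORT B =====
-- loop body: if '~' in part: segs = part.split('~'); taxonomy.setdefault(segs[0], segs[1].strip())
def pvStepB (d : PySem.Dict String String) (part : String) : PySem.Dict String String :=
  if PySem.Str.isIn "~" part then
    -- split? is `some` ("~" nonempty); segs[0]/segs[1] are in range since '~' ∈ part
    let segs := (PySem.Str.split? part "~").getD []
    d.setdefault (PySem.List.pyGetD segs 0 "") (PySem.Str.strip (PySem.List.pyGetD segs 1 ""))
  else d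

def extract_taxonomy_value_alt (text : String) (key : String) : Option String :=
  (((PySem.Str.split? text "_").getD []).foldl pvStepB PySem.Dict.empty).get? key

-- ===== PRECONDITION & SPEC =====
-- When key itself contains '~' and some '_'-part of text starts with key+'~', A returns the
-- segment between that part's first and second '~' (a fragment of the key itself), while B
-- returns none; none is intended since taxonomy keys cannot contain the '~' delimiter and
-- A's value is an accident of indexing split('~')[1].
def D_extract_taxonomy_value (text : String) (key : String) : Prop :=
  '~' ∈ key.toList ∧ ∃ part ∈ text.toList.splitOn '_', key.toList ++ ['~'] <+: part
instance (text : String) (key : String) : Decidable (D_extract_taxonomy_value text key) := by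
  unfold D_extract_taxonomy_value; infer_instance

def Spec_extract_taxonomy_value (text : String) (key : String) (out : Option String) : Prop :=
  ¬ D_extract_taxonomy_value text key → out = extract_taxonomy_value_alt text key
instance (text : String) (key : String) (out : Option String) : Decidable (Spec_extract_taxonomy_value text key out) := by
  unfold Spec_extract_taxonomy_value; infer_instance

def pvDiffWitness_extract_taxonomy_value : String × String := ("a~b~c", "a~b")
def pvDiffWitnessOut_extract_taxonomy_value : (Option String) × (Option String) := (some "b", none)

-- ===== CLAIM (what is proved, stated in full; the proofs are below) =====
def Claim_unchanged_extract_taxonomy_value : Prop := ∀ (text : String) (key : String), Dom_extract_taxonomy_value text key → Spec_extract_taxonomy_value text key (extract_taxonomy_value text key)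
def Claim_changed_extract_taxonomy_value : Prop := Dom_extract_taxonomy_value (pvDiffWitness_extract_taxonomy_value.1) (pvDiffWitness_extract_taxonomy_value.2) ∧ D_extract_taxonomy_value (pvDiffWitness_extract_taxonomy_value.1) (pvDiffWitness_extract_taxonomy_value.2) ∧ extract_taxonomy_value (pvDiffWitness_extract_taxonomy_value.1) (pvDiffWitness_extract_taxonomy_value.2) = pvDiffWitnessOut_extract_taxonomy_value.1 ∧ extract_taxonomy_value_alt (pvDiffWitness_extract_taxonomy_value.1) (pvDiffWitness_extract_taxonomy_value.2) = pvDiffWitnessOut_extract_taxonomy_value.2 ∧ pvDiffWitnessOut_extract_taxonomy_value.1 ≠ pvDiffWitnessOut_extract_taxonomy_value.2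
def Claim_exact_extract_taxonomy_value : Prop := ∀ (text : String) (key : String), Dom_extract_taxonomy_value text key → D_extract_taxonomy_value text key → extract_taxonomy_value text key ≠ extract_taxonomy_value_alt text key

-- ===== LEMMAS AND PROOFS =====

-- splitOn with a single-char separator, restated structurally
def pvSAux (sep : Char) : List Char → List Char → List (List Char)
  | [], cur => [cur.reverse]
  | c :: rest, cur =>
    if c = sep then cur.reverse :: pvSAux sep rest [] else pvSAux sep rest (c :: cur)

theorem pv_go_eq (sep : Char) (fuel : Nat) (l cur : List Char) (acc : List (List Char))
    (h : l.length < fuel) :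
    PySem.Chars.splitOn.go [sep] fuel l cur acc = acc.reverse ++ pvSAux sep l cur := by
  induction fuel generalizing l cur acc with
  | zero => omega
  | succ fuel ih =>
    cases l with
    | nil => simp [PySem.Chars.splitOn.go, pvSAux]
    | cons c rest =>
      rw [PySem.Chars.splitOn.go]
      by_cases hc : c = sep
      · subst hc
        rw [if_pos (by simp [List.isPrefixOf])]
        simp only [List.length_cons, List.length_nil, List.drop_succ_cons, List.drop_zero]
        rw [ih _ _ _ (by simp at h ⊢; omega)]
        simp [pvSAux]
      · rw [if_neg (by simp [List.isPrefixOf, Ne.symm hc])]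
        rw [ih _ _ _ (by simp at h ⊢; omega)]
        simp [pvSAux, hc]

theorem pv_splitOn_eq (sep : Char) (cs : List Char) :
    PySem.Chars.splitOn cs [sep] = pvSAux sep cs [] := by
  rw [PySem.Chars.splitOn, pv_go_eq _ _ _ _ _ (by omega)]
  simp

theorem pv_sAux_splitOn (sep : Char) (l : List Char) :
    ∀ cur, pvSAux sep l cur = (l.splitOn sep).modifyHead (cur.reverse ++ ·) := by
  induction l with
  | nil => intro cur; simp [pvSAux, List.splitOn]
  | cons c rest ih =>
    intro cur
    by_cases hc : c = sep
    · subst hc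
      rw [pvSAux, if_pos rfl, ih []]
      conv_rhs => rw [List.splitOn, List.splitOnP_cons]
      simp only [beq_self_eq_true, ite_true, List.splitOn]
      rw [show (fun x : List Char => List.reverse [] ++ x) = id from funext fun x => by simp]
      rw [List.modifyHead_id]
      simp
    · rw [pvSAux, if_neg hc, ih (c :: cur)]
      conv_rhs => rw [List.splitOn, List.splitOnP_cons]
      simp only [beq_iff_eq, hc, ite_false]
      cases h : List.splitOnP (fun x => x == sep) rest with
      | nil => simp [List.splitOn, h]
      | cons x xs => simp [List.splitOn, h]

theorem pv_sAux_nil (sep : Char) (l : List Char) : pvSAux sep l [] = l.splitOn sep := by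
  rw [pv_sAux_splitOn]
  rw [show (fun x : List Char => List.reverse [] ++ x) = id from funext fun x => by simp]
  rw [List.modifyHead_id]
  rfl

theorem pv_sAux_yes (pre suf cur : List Char) (h : '~' ∉ pre) :
    pvSAux '~' (pre ++ '~' :: suf) cur = (cur.reverse ++ pre) :: pvSAux '~' suf [] := by
  induction pre generalizing cur with
  | nil => simp [pvSAux]
  | cons c rest ih =>
    simp only [List.mem_cons, not_or] at h
    simp [pvSAux, Ne.symm h.1, ih _ h.2]

theorem pv_sAux_ne_nil (sep : Char) (l cur : List Char) : pvSAux sep l cur ≠ [] := by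
  induction l generalizing cur with
  | nil => simp [pvSAux]
  | cons c rest ih => by_cases hc : c = sep <;> simp [pvSAux, hc, ih]

theorem pv_decomp (l : List Char) (h : '~' ∈ l) :
    ∃ pre suf, l = pre ++ '~' :: suf ∧ '~' ∉ pre := by
  induction l with
  | nil => simp at h
  | cons c rest ih =>
    by_cases hc : c = '~'
    · exact ⟨[], rest, by simp [hc], by simp⟩
    · rcases ih ((List.mem_cons.1 h).resolve_left (fun e => hc e.symm)) with
        ⟨pre, suf, rfl, hp⟩
      exact ⟨c :: pre, suf, rfl, by simp [hp]; exact fun e => hc e.symm⟩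

theorem pv_prefix_iff (k pre suf : List Char) (hk : '~' ∉ k) (hp : '~' ∉ pre) :
    (k ++ ['~']) <+: (pre ++ '~' :: suf) ↔ k = pre := by
  induction k generalizing pre with
  | nil =>
    cases pre with
    | nil => simp
    | cons c rest =>
      simp only [List.mem_cons, not_or] at hp
      simp only [List.nil_append]
      simp [List.cons_prefix_cons, hp.1]
  | cons a k' ih =>
    simp only [List.mem_cons, not_or] at hk
    cases pre with
    | nil =>
      simp only [List.nil_append, List.cons_append, List.cons_prefix_cons]
      constructor
      · rintro ⟨ha, _⟩; exact absurd ha (fun e => hk.1 e.symm)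
      · intro h; simp at h
    | cons c rest =>
      simp only [List.mem_cons, not_or] at hp
      simp [List.cons_prefix_cons, ih rest hk.2 hp.2]

theorem pv_isIn (p : String) : PySem.Str.isIn "~" p = true ↔ '~' ∈ p.toList := by
  rw [PySem.Str.isIn_iff_infix]
  exact List.singleton_infix_iff '~' p.toList

theorem pv_split_str (p : String) (c : Char) (sc : String) (hsc : sc.toList = [c]) :
    ∃ ss : List String, PySem.Str.split? p sc = some ss ∧
      ss.map String.toList = pvSAux c p.toList [] := by
  have h := PySem.Str.split?_map p sc
  rw [hsc, PySem.Chars.split?] at h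
  simp only [List.isEmpty_cons] at h
  rw [pv_splitOn_eq] at h
  cases hss : PySem.Str.split? p sc with
  | none => rw [hss] at h; simp at h
  | some ss => rw [hss] at h; exact ⟨ss, rfl, by simpa using h⟩

theorem pv_sw_pfx (p key : String) :
    PySem.Str.startswith p (key ++ "~") = true ↔ key.toList ++ ['~'] <+: p.toList := by
  rw [PySem.Str.startswith_eq, PySem.Chars.startswith_iff,
    show (key ++ "~").toList = key.toList ++ ['~'] by simp]

theorem pv_sw_iff (p key : String) (hk : '~' ∉ key.toList) (pre suf : List Char)
    (hdec : p.toList = pre ++ '~' :: suf) (hpre : '~' ∉ pre) :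
    (PySem.Str.startswith p (key ++ "~") = true ↔ key.toList = pre) := by
  rw [pv_sw_pfx, hdec]
  exact pv_prefix_iff _ _ _ hk hpre

theorem pv_sw_mem (p key : String) (h : PySem.Str.startswith p (key ++ "~") = true) :
    '~' ∈ p.toList := by
  rw [pv_sw_pfx] at h
  exact h.subset (by simp)

-- decomposition of the '~'-split of a part that contains '~'
theorem pv_segs (p : String) (hp : '~' ∈ p.toList) :
    ∃ (S0 S1 : String) (T : List String) (suf : List Char),
      PySem.Str.split? p "~" = some (S0 :: S1 :: T) ∧
      p.toList = S0.toList ++ '~' :: suf ∧ '~' ∉ S0.toList := by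
  obtain ⟨pre, suf, hdec, hpre⟩ := pv_decomp _ hp
  obtain ⟨ss, hss, hmap⟩ := pv_split_str p '~' "~" rfl
  rw [hdec, pv_sAux_yes _ _ _ hpre] at hmap
  obtain ⟨s1, t, hst⟩ := List.exists_cons_of_ne_nil (pv_sAux_ne_nil '~' suf [])
  rw [hst] at hmap
  match ss, hmap with
  | S0 :: S1 :: T, hmap =>
    simp only [List.map_cons, List.cons.injEq] at hmap
    exact ⟨S0, S1, T, suf, by rw [hss], by rw [hdec, hmap.1]; simp, by rw [hmap.1]; simpa using hpre⟩

-- D_ (stated over List.splitOn / IsPrefix) in terms of the Python primitives the ports use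
theorem pv_D_iff (text key : String) :
    D_extract_taxonomy_value text key ↔
      (PySem.Str.isIn "~" key = true ∧
       ∃ part ∈ (PySem.Str.split? text "_").getD [],
         PySem.Str.startswith part (key ++ "~") = true) := by
  obtain ⟨ss, hss, hmap⟩ := pv_split_str text '_' "_" rfl
  rw [pv_sAux_nil] at hmap
  unfold D_extract_taxonomy_value
  rw [hss, pv_isIn]
  simp only [Option.getD_some]
  refine and_congr Iff.rfl ?_
  constructor
  · rintro ⟨part, hmem, hpfx⟩
    rw [← hmap] at hmem
    rcases List.mem_map.1 hmem with ⟨P, hP, rfl⟩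
    exact ⟨P, hP, (pv_sw_pfx P key).2 hpfx⟩
  · rintro ⟨P, hP, hsw⟩
    exact ⟨P.toList, by rw [← hmap]; exact List.mem_map_of_mem hP, (pv_sw_pfx P key).1 hsw⟩

theorem pv_dict_scan (key : String) (hk : '~' ∉ key.toList) (parts : List String) :
    ∀ d : PySem.Dict String String,
      (parts.foldl pvStepB d).get? key = (d.get? key).or (pvScanA key parts) := by
  induction parts with
  | nil => intro d; simp [pvScanA]
  | cons p ps ih =>
    intro d
    rw [List.foldl_cons, ih]
    by_cases hp : '~' ∈ p.toList
    · obtain ⟨S0, S1, T, suf, hss, hdec, hpre⟩ := pv_segs p hp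
      have hstep : pvStepB d p = d.setdefault S0 (PySem.Str.strip S1) := by
        rw [pvStepB, if_pos ((pv_isIn p).2 hp), hss]
        simp [PySem.List.pyGetD]
      by_cases hkey : key = S0
      · subst hkey
        rw [hstep, PySem.Dict.get?_setdefault_self]
        have hsw : PySem.Str.startswith p (key ++ "~") = true :=
          (pv_sw_iff p key hk key.toList suf hdec hpre).2 rfl
        rw [pvScanA, if_pos hsw, hss]
        simp only [Option.getD_some]
        rw [show PySem.List.pyGet? (key :: S1 :: T) 1 = some S1 by
          simp [PySem.List.pyGet?, PySem.List.pyIdx?]]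
        cases hdk : d.get? key <;> simp [Option.or]
      · rw [hstep, PySem.Dict.get?_setdefault_of_ne _ _ hkey]
        have hsw : ¬ PySem.Str.startswith p (key ++ "~") = true := by
          intro h
          exact hkey (String.toList_inj.1 ((pv_sw_iff p key hk S0.toList suf hdec hpre).1 h))
        rw [pvScanA, if_neg hsw]
    · have hstep : pvStepB d p = d := by
        rw [pvStepB, if_neg (by rw [pv_isIn]; exact hp)]
      have hsw : ¬ PySem.Str.startswith p (key ++ "~") = true := fun h => hp (pv_sw_mem p key h)
      rw [hstep, pvScanA, if_neg hsw]

theorem pv_dict_skip (key : String) (hk : '~' ∈ key.toList) (parts : List String) :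
    ∀ d : PySem.Dict String String, (parts.foldl pvStepB d).get? key = d.get? key := by
  induction parts with
  | nil => intro d; rfl
  | cons p ps ih =>
    intro d
    rw [List.foldl_cons, ih]
    by_cases hp : '~' ∈ p.toList
    · obtain ⟨S0, S1, T, suf, hss, hdec, hpre⟩ := pv_segs p hp
      have hstep : pvStepB d p = d.setdefault S0 (PySem.Str.strip S1) := by
        rw [pvStepB, if_pos ((pv_isIn p).2 hp), hss]
        simp [PySem.List.pyGetD]
      rw [hstep, PySem.Dict.get?_setdefault_of_ne]
      intro h; rw [h] at hk; exact hpre hk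
    · rw [show pvStepB d p = d by rw [pvStepB, if_neg (by rw [pv_isIn]; exact hp)]]

theorem pv_scan_none (key : String) (parts : List String)
    (h : ∀ p ∈ parts, ¬ PySem.Str.startswith p (key ++ "~") = true) :
    pvScanA key parts = none := by
  induction parts with
  | nil => rfl
  | cons p ps ih =>
    rw [pvScanA, if_neg (h p (by simp))]
    exact ih (fun q hq => h q (by simp [hq]))

theorem pv_scan_some (key : String) (parts : List String)
    (h : ∃ p ∈ parts, PySem.Str.startswith p (key ++ "~") = true) :
    ∃ v, pvScanA key parts = some v := by
  induction parts with
  | nil => simp at h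
  | cons p ps ih =>
    by_cases hsw : PySem.Str.startswith p (key ++ "~") = true
    · obtain ⟨S0, S1, T, suf, hss, _, _⟩ := pv_segs p (pv_sw_mem p key hsw)
      refine ⟨PySem.Str.strip S1, ?_⟩
      rw [pvScanA, if_pos hsw, hss]
      simp only [Option.getD_some]
      rw [show PySem.List.pyGet? (S0 :: S1 :: T) 1 = some S1 by
        simp [PySem.List.pyGet?, PySem.List.pyIdx?]]
    · rw [pvScanA, if_neg hsw]
      apply ih
      rcases h with ⟨q, hq, hqsw⟩
      rcases List.mem_cons.1 hq with rfl | hq'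
      · exact absurd hqsw hsw
      · exact ⟨q, hq', hqsw⟩

-- ===== VERDICT (by name: the statement is the Claim_ definition above) =====
theorem extract_taxonomy_value_spec : Claim_unchanged_extract_taxonomy_value := by
  intro text key _ hnD
  rw [pv_D_iff] at hnD
  by_cases hkey : PySem.Str.isIn "~" key = true
  · have hk := (pv_isIn key).1 hkey
    unfold extract_taxonomy_value extract_taxonomy_value_alt
    rw [pv_dict_skip key hk _ _, PySem.Dict.get?_empty]
    apply pv_scan_none
    intro p hp hsw
    exact hnD ⟨hkey, p, hp, hsw⟩
  · have hk : '~' ∉ key.toList := fun h => hkey ((pv_isIn key).2 h)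
    unfold extract_taxonomy_value extract_taxonomy_value_alt
    rw [pv_dict_scan key hk _ _, PySem.Dict.get?_empty, Option.none_or]

theorem extract_taxonomy_value_changed : Claim_changed_extract_taxonomy_value := by
  unfold Claim_changed_extract_taxonomy_value; decide

theorem extract_taxonomy_value_tight : Claim_exact_extract_taxonomy_value := by
  intro text key _ hD
  rw [pv_D_iff] at hD
  obtain ⟨hkey, p, hp, hsw⟩ := hD
  have hk := (pv_isIn key).1 hkey
  obtain ⟨v, hv⟩ := pv_scan_some key _ ⟨p, hp, hsw⟩
  unfold extract_taxonomy_value extract_taxonomy_value_alt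
  rw [hv, pv_dict_skip key hk _ _, PySem.Dict.get?_empty]
  simp
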